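-- pv_equiv track=rewrite | github.com/seffu/bomahut_assignment | assignment.py | find_max_in_row_min_in_col
-- ===== SOURCE A (Python) =====
-- def find_max_in_row_min_in_col(mat):
--     # Check that the input matrix satisfies the given constraints
--     M = len(mat)
--     N = len(mat[0])
--     if not(1 <= M <= 50) or not(1 <= N <= 50):
--         raise ValueError("The matrix dimensions must be between 1 and 50")
--     for i in range(M):
--         if len(mat[i]) != N:
--             raise ValueError("All rows in the matrix must have the same length")
--         for j in range(N):
--             if not(1 <= mat[i][j] <= 105):
--                 raise ValueError("All elements in the matrix must be between 1 and 105")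
--     if len(set([elem for row in mat for elem in row])) != M * N:
--         raise ValueError("All elements in the matrix must be distinct")
--
--     # Find the maximum value in each row
--     row_max = [max(row) for row in mat]
--
--     # Find the minimum value in each column
--     col_min = [min([mat[i][j] for i in range(M)]) for j in range(N)]
--
--     # Find the numbers that are the maximum value in its row and the minimum in its column
--     result = [mat[i][j] for i in range(M) for j in range(N) if mat[i][j] == row_max[i] and mat[i][j] == col_min[j]]
--
--     return result
-- ===== SOURCE B (Python) =====
-- def find_max_in_row_min_in_col(mat):
--     # Check that the input matrix satisfies the given constraints (identical to A)
--     M = len(mat)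
--     N = len(mat[0])
--     if not(1 <= M <= 50) or not(1 <= N <= 50):
--         raise ValueError("The matrix dimensions must be between 1 and 50")
--     for i in range(M):
--         if len(mat[i]) != N:
--             raise ValueError("All rows in the matrix must have the same length")
--         for j in range(N):
--             if not(1 <= mat[i][j] <= 105):
--                 raise ValueError("All elements in the matrix must be between 1 and 105")
--     if len(set([elem for row in mat for elem in row])) != M * N:
--         raise ValueError("All elements in the matrix must be distinct")
--
--     # Per-row argmax, then verify on demand that it is the minimum of its column.
--     result = []
--     for row in mat:
--         v = max(row)
--         j = row.index(v)
--         if all(r[j] >= v for r in mat):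
--             result.append(v)
--     return result
-- ===== Notes on version B (the rewrite author's own statement) =====
-- stated objective: alternative
-- what changed: Replaces A's precomputed col_min table and triple-condition index-pair comprehension with a fold over rows that takes each row's argmax and verifies on demand that it is the minimum of its column.
import Mathlib
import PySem

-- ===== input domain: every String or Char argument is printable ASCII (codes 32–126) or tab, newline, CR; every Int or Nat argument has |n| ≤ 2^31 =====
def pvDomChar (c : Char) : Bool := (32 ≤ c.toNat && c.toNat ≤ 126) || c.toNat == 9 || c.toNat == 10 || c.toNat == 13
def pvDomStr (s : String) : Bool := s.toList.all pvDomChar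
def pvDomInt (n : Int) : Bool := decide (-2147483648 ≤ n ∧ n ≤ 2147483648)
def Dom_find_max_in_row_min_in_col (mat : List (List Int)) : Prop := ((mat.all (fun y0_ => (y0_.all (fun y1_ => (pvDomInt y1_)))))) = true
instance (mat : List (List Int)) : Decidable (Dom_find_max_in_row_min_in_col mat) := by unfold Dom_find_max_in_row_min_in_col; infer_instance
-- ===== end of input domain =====

-- B replaces A's precomputed column-minimum table and index-pair comprehension by a fold over
-- rows (per-row argmax, then an on-demand column-minimum check); same return value on every
-- input where A returns (Pre_ excludes exactly the inputs where A raises).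


-- ===== PORT A =====
-- Literal port of A past the validation block (the validation only raises; every raising input
-- is excluded by Pre_ below). max(row)/min(col) are PySem.List.max?/min? with `.getD 0`
-- (rows and columns are nonempty under Pre_, so the default is never consulted).
def find_max_in_row_min_in_col (mat : List (List Int)) : List Int :=
  let M : Int := mat.length
  let N : Int := (PySem.List.pyGetD mat 0 []).length
  let row_max : List Int := mat.map (fun row => (PySem.List.max? row (fun y => y)).getD 0)
  let col_min : List Int := (PySem.List.pyRange 0 N 1).map (fun j =>
    (PySem.List.min? ((PySem.List.pyRange 0 M 1).map (fun i =>
      PySem.List.pyGetD (PySem.List.pyGetD mat i []) j 0)) (fun y => y)).getD 0)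
  (PySem.List.pyRange 0 M 1).flatMap (fun i =>
    (PySem.List.pyRange 0 N 1).filterMap (fun j =>
      let v := PySem.List.pyGetD (PySem.List.pyGetD mat i []) j 0
      if v = PySem.List.pyGetD row_max i 0 ∧ v = PySem.List.pyGetD col_min j 0
      then some v else none))

-- ===== PORT B =====
-- Literal port of Source B's loop: v = max(row); j = row.index(v); keep v iff all(r[j] >= v for r in mat).
def find_max_in_row_min_in_col_alt (mat : List (List Int)) : List Int :=
  mat.foldl (fun result row =>
    let v : Int := (PySem.List.max? row (fun y => y)).getD 0
    let j : Int := ((PySem.List.index? row v).getD 0 : Nat)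
    if mat.all (fun r => decide (v ≤ PySem.List.pyGetD r j 0))
    then result ++ [v] else result) []

-- ===== PRECONDITION & SPEC =====
-- Exactly the inputs on which A returns: nonempty matrix, dimensions ≤ 50, rectangular rows,
-- entries in [1,105], all entries pairwise distinct (on every other input A raises,
-- ValueError from the validation block or IndexError on the empty matrix).
def Pre_find_max_in_row_min_in_col (mat : List (List Int)) : Prop :=
  1 ≤ mat.length ∧ mat.length ≤ 50 ∧
  1 ≤ (mat.headD []).length ∧ (mat.headD []).length ≤ 50 ∧
  (∀ row ∈ mat, row.length = (mat.headD []).length) ∧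
  (∀ row ∈ mat, ∀ x ∈ row, 1 ≤ x ∧ x ≤ 105) ∧
  (mat.flatMap id).Nodup

instance (mat : List (List Int)) : Decidable (Pre_find_max_in_row_min_in_col mat) := by
  unfold Pre_find_max_in_row_min_in_col; infer_instance

def pvWitness_find_max_in_row_min_in_col : List (List Int) := [[2, 1], [4, 3]]

def Spec_find_max_in_row_min_in_col (mat : List (List Int)) (out : List Int) : Prop := out = find_max_in_row_min_in_col_alt mat
instance (mat : List (List Int)) (out : List Int) : Decidable (Spec_find_max_in_row_min_in_col mat out) := by unfold Spec_find_max_in_row_min_in_col; infer_instance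

-- ===== CLAIM (what is proved, stated in full; the proofs are below) =====
def Claim_equal_find_max_in_row_min_in_col : Prop := ∀ (mat : List (List Int)), Dom_find_max_in_row_min_in_col mat → Pre_find_max_in_row_min_in_col mat → Spec_find_max_in_row_min_in_col mat (find_max_in_row_min_in_col mat)

-- ===== LEMMAS AND PROOFS =====

-- filterMap over List.range n of a function that is none except possibly at index k.
theorem filterMap_range_single {β : Type} (f : Nat → Option β) (n k : Nat) (hk : k < n)
    (hne : ∀ j, j < n → j ≠ k → f j = none) :
    (List.range n).filterMap f = (f k).toList := by
  induction n with
  | zero => omega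
  | succ n ih =>
    rw [List.range_succ, List.filterMap_append]
    rcases Nat.lt_or_ge k n with h | h
    · rw [ih h (fun j hj hj' => hne j (by omega) hj')]
      simp [hne n (by omega) (by omega)]
    · have hkn : k = n := by omega
      subst hkn
      have h0 : (List.range k).filterMap f = [] := by
        rw [List.filterMap_eq_nil_iff]
        intro j hj
        rw [List.mem_range] at hj
        exact hne j (by omega) (by omega)
      rw [h0]
      cases h1 : f k <;> simp [h1]

-- flatMap respects pointwise equality on members.
theorem flatMap_congr_mem {α β : Type} (l : List α) (f g : α → List β)
    (h : ∀ x ∈ l, f x = g x) : l.flatMap f = l.flatMap g := by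
  induction l with
  | nil => rfl
  | cons a t ih =>
    simp only [List.flatMap_cons]
    rw [h a (by simp), ih (fun x hx => h x (by simp [hx]))]

-- flatMap of a guarded singleton is map-over-filter.
theorem flatMap_if_singleton {α β : Type} (l : List α) (p : α → Bool) (f : α → β) :
    l.flatMap (fun x => if p x then [f x] else []) = (l.filter p).map f := by
  induction l with
  | nil => rfl
  | cons a t ih =>
    simp only [List.flatMap_cons, List.filter_cons]
    by_cases h : p a <;> simp [h, ih]

-- min(l) equals m iff m is a member and a lower bound.
theorem min_eq_iff_le_all (l : List Int) (m : Int) (hm : m ∈ l) :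
    ((PySem.List.min? l (fun y => y)).getD 0 = m ↔ ∀ y ∈ l, m ≤ y) := by
  have hne : l ≠ [] := by rintro rfl; simp at hm
  obtain ⟨mm, hmm⟩ : ∃ mm, PySem.List.min? l (fun y => y) = some mm := by
    cases h : PySem.List.min? l (fun y => y) with
    | none => exact absurd ((PySem.List.min?_eq_none_iff l _).mp h) hne
    | some mm => exact ⟨mm, rfl⟩
  have hmin := PySem.List.min?_isMin hmm
  have hmem := PySem.List.min?_mem hmm
  rw [hmm]
  simp only [Option.getD_some]
  constructor
  · rintro rfl; exact hmin
  · intro hle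
    exact le_antisymm (hmin m hm) (hle mm hmem)

-- A's per-row inner comprehension, with the column lists already in row-major form.
def rowBodyA (mat : List (List Int)) (row : List Int) : List Int :=
  (PySem.List.pyRange 0 (((mat.headD []).length : Nat) : Int) 1).filterMap (fun j =>
    let v := PySem.List.pyGetD row j 0
    if v = (PySem.List.max? row (fun y => y)).getD 0 ∧
       v = PySem.List.pyGetD ((PySem.List.pyRange 0 (((mat.headD []).length : Nat) : Int) 1).map (fun j' =>
          (PySem.List.min? (mat.map (fun r => PySem.List.pyGetD r j' 0)) (fun y => y)).getD 0)) j 0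
    then some v else none)

-- an index loop over a list's positions is a loop over the list
theorem flatMap_pyGetD_range {a b : Type} (xs : List a) (d : a) (F : a -> List b) :
    (PySem.List.pyRange 0 ((xs.length : Nat) : Int) 1).flatMap (fun i => F (PySem.List.pyGetD xs i d))
      = xs.flatMap F := by
  conv_rhs => rw [← PySem.List.map_pyGetD_pyRange_zero' xs d]
  rw [List.flatMap_map]

-- The per-row core: A's inner comprehension over columns equals B's guarded singleton.
theorem per_row_eq (mat : List (List Int)) (row : List Int)
    (hmem : row ∈ mat) (hlen : row.length = (mat.headD []).length)
    (hpos : 0 < (mat.headD []).length) (hnd : row.Nodup) :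
    rowBodyA mat row
    = (if mat.all (fun r => decide ((PySem.List.max? row (fun y => y)).getD 0 ≤
          PySem.List.pyGetD r (((PySem.List.index? row ((PySem.List.max? row (fun y => y)).getD 0)).getD 0 : Nat) : Int) 0))
       then [(PySem.List.max? row (fun y => y)).getD 0] else []) := by
  unfold rowBodyA
  rw [← hlen] at hpos ⊢
  have hne : row ≠ [] := by intro h; rw [h] at hpos; simp at hpos
  obtain ⟨m, hm⟩ : ∃ m, PySem.List.max? row (fun y => y) = some m := by
    cases h : PySem.List.max? row (fun y => y) with
    | none => exact absurd ((PySem.List.max?_eq_none_iff row _).mp h) hne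
    | some m => exact ⟨m, rfl⟩
  have hmmem := PySem.List.max?_mem hm
  obtain ⟨k, hk⟩ : ∃ k, PySem.List.index? row m = some k :=
    Option.isSome_iff_exists.mp ((PySem.List.index?_isSome_iff row m).mpr hmmem)
  obtain ⟨hklt, hrowk, -⟩ := PySem.List.getElem_of_index?_eq_some hk
  simp only [hm, hk, Option.getD_some]
  set cm : List Int := (PySem.List.pyRange 0 ((row.length : Nat) : Int) 1).map (fun j' =>
      (PySem.List.min? (mat.map (fun r => PySem.List.pyGetD r j' 0)) (fun y => y)).getD 0) with hcm
  rw [PySem.List.pyRange_zero_nat, List.filterMap_map]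
  rw [filterMap_range_single _ row.length k hklt ?hne]
  case hne =>
    intro j hj hjk
    have hne' : row[j]'hj ≠ m := by
      intro he
      exact hjk ((List.Nodup.getElem_inj_iff hnd).mp (by rw [he, hrowk]))
    have h1 : row[j]? = some (row[j]'hj) := List.getElem?_eq_getElem hj
    simp [PySem.List.pyGetD_natCast, h1, hne']
  have h2 : row[k]? = some (row[k]'hklt) := List.getElem?_eq_getElem hklt
  have hcmk : PySem.List.pyGetD cm ((k : Nat) : Int) 0
      = (PySem.List.min? (mat.map (fun r => PySem.List.pyGetD r ((k : Nat) : Int) 0)) (fun y => y)).getD 0 := by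
    rw [hcm, PySem.List.pyGetD_map_pyRange _ row.length k 0 hklt]
  have hmemcol : m ∈ mat.map (fun r => PySem.List.pyGetD r ((k : Nat) : Int) 0) := by
    refine List.mem_map.mpr ⟨row, hmem, ?_⟩
    simp [PySem.List.pyGetD_natCast, h2, hrowk]
  have hiff := min_eq_iff_le_all _ m hmemcol
  have hget : PySem.List.pyGetD row ((k : Nat) : Int) 0 = m := by
    rw [PySem.List.pyGetD_natCast, List.getD_eq_getElem _ _ hklt, hrowk]
  by_cases hc : mat.all (fun r => decide (m ≤ PySem.List.pyGetD r ((k : Nat) : Int) 0)) = true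
  · have hcol : (PySem.List.min? (mat.map (fun r => PySem.List.pyGetD r ((k : Nat) : Int) 0)) (fun y => y)).getD 0 = m := by
      refine hiff.mpr ?_
      intro y hy
      obtain ⟨r, hr, rfl⟩ := List.mem_map.mp hy
      exact of_decide_eq_true (List.all_eq_true.mp hc r hr)
    rw [if_pos hc]
    show (if PySem.List.pyGetD row ((k : Nat) : Int) 0 = m ∧
            PySem.List.pyGetD row ((k : Nat) : Int) 0 = PySem.List.pyGetD cm ((k : Nat) : Int) 0
          then some (PySem.List.pyGetD row ((k : Nat) : Int) 0) else none).toList = [m]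
    rw [hget, hcmk, hcol]
    simp
  · have hcol : (PySem.List.min? (mat.map (fun r => PySem.List.pyGetD r ((k : Nat) : Int) 0)) (fun y => y)).getD 0 ≠ m := by
      intro h
      refine hc (List.all_eq_true.mpr fun r hr => decide_eq_true ?_)
      exact hiff.mp h _ (List.mem_map.mpr ⟨r, hr, rfl⟩)
    rw [if_neg hc]
    show (if PySem.List.pyGetD row ((k : Nat) : Int) 0 = m ∧
            PySem.List.pyGetD row ((k : Nat) : Int) 0 = PySem.List.pyGetD cm ((k : Nat) : Int) 0
          then some (PySem.List.pyGetD row ((k : Nat) : Int) 0) else none).toList = []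
    rw [hget, hcmk]
    have hcond : ¬(m = m ∧ m = (PySem.List.min? (mat.map (fun r => PySem.List.pyGetD r ((k : Nat) : Int) 0)) (fun y => y)).getD 0) := by
      rintro ⟨-, h⟩
      exact hcol h.symm
    rw [if_neg hcond]
    rfl

-- ===== VERDICT (by name: the statement is the Claim_ definition above) =====
theorem find_max_in_row_min_in_col_spec : Claim_equal_find_max_in_row_min_in_col := by
  intro mat _ hpre
  obtain ⟨hM1, _, hN1, _, hrect, _, hnodup⟩ := hpre
  unfold Spec_find_max_in_row_min_in_col
  have hrownd : ∀ row ∈ mat, row.Nodup := by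
    rw [List.flatMap_id, List.nodup_flatten] at hnodup
    exact hnodup.1
  have hB : find_max_in_row_min_in_col_alt mat =
      mat.flatMap (fun row =>
        if mat.all (fun r => decide ((PySem.List.max? row (fun y => y)).getD 0 ≤
            PySem.List.pyGetD r (((PySem.List.index? row ((PySem.List.max? row (fun y => y)).getD 0)).getD 0 : Nat) : Int) 0))
        then [(PySem.List.max? row (fun y => y)).getD 0] else []) := by
    show mat.foldl (fun result row =>
        if mat.all (fun r => decide ((PySem.List.max? row (fun y => y)).getD 0 ≤
            PySem.List.pyGetD r (((PySem.List.index? row ((PySem.List.max? row (fun y => y)).getD 0)).getD 0 : Nat) : Int) 0))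
        then result ++ [(PySem.List.max? row (fun y => y)).getD 0] else result) [] = _
    rw [PySem.List.foldl_append_if
      (fun row => mat.all (fun r => decide ((PySem.List.max? row (fun y => y)).getD 0 ≤
          PySem.List.pyGetD r (((PySem.List.index? row ((PySem.List.max? row (fun y => y)).getD 0)).getD 0 : Nat) : Int) 0)))
      (fun row => (PySem.List.max? row (fun y => y)).getD 0) mat []]
    rw [flatMap_if_singleton]
    rfl
  rw [hB]
  show (PySem.List.pyRange 0 ((mat.length : Nat) : Int) 1).flatMap (fun i =>
      (PySem.List.pyRange 0 (((PySem.List.pyGetD mat 0 []).length : Nat) : Int) 1).filterMap (fun j =>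
        let v := PySem.List.pyGetD (PySem.List.pyGetD mat i []) j 0
        if v = PySem.List.pyGetD (mat.map (fun row => (PySem.List.max? row (fun y => y)).getD 0)) i 0 ∧
           v = PySem.List.pyGetD ((PySem.List.pyRange 0 (((PySem.List.pyGetD mat 0 []).length : Nat) : Int) 1).map (fun j =>
              (PySem.List.min? ((PySem.List.pyRange 0 ((mat.length : Nat) : Int) 1).map (fun i =>
                PySem.List.pyGetD (PySem.List.pyGetD mat i []) j 0)) (fun y => y)).getD 0)) j 0
        then some v else none)) = _
  have hhead : PySem.List.pyGetD mat 0 ([] : List Int) = mat.headD [] := by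
    rw [PySem.List.pyGetD_zero]; cases mat <;> simp
  rw [hhead]
  have hcol : ∀ j : Int, (PySem.List.pyRange 0 ((mat.length : Nat) : Int) 1).map (fun i =>
      PySem.List.pyGetD (PySem.List.pyGetD mat i []) j 0) = mat.map (fun r => PySem.List.pyGetD r j 0) := by
    intro j
    conv_rhs => rw [← PySem.List.map_pyGetD_pyRange_zero' mat ([] : List Int)]
    rw [List.map_map]
    rfl
  simp only [hcol]
  have hrm : ∀ i : Int, i ∈ PySem.List.pyRange 0 ((mat.length : Nat) : Int) 1 →
      PySem.List.pyGetD (mat.map (fun row => (PySem.List.max? row (fun y => y)).getD 0)) i 0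
        = (PySem.List.max? (PySem.List.pyGetD mat i []) (fun y => y)).getD 0 := by
    intro i hi
    rw [PySem.List.mem_pyRange_one] at hi
    obtain ⟨k, rfl⟩ : ∃ k : Nat, i = (k : Int) := ⟨i.toNat, (Int.toNat_of_nonneg hi.1).symm⟩
    have hk : k < mat.length := by exact_mod_cast hi.2
    rw [PySem.List.pyGetD_natCast, PySem.List.pyGetD_natCast,
        List.getD_eq_getElem _ 0 (by simpa using hk), List.getD_eq_getElem _ [] hk, List.getElem_map]
  rw [flatMap_congr_mem _ _ (fun i => rowBodyA mat (PySem.List.pyGetD mat i []))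
      (by intro i hi; simp only [hrm i hi]; rfl)]
  rw [flatMap_pyGetD_range mat ([] : List Int) (rowBodyA mat)]
  exact flatMap_congr_mem _ _ _ (fun row hrow =>
    per_row_eq mat row hrow (hrect row hrow) hN1 (hrownd row hrow))
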